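-- pv_equiv track=rewrite | github.com/ChangMinL2E/programmers | 프로그래머스/unrated/181932. 코드 처리하기/코드 처리하기.py | solution
-- ===== SOURCE A (Python) =====
-- def solution(code):
--     answer = ''
--     mode = 0
--
--     for i in range(len(code)):
--         if code[i] == '1':
--             mode = (mode + 1)%2
--         else:
--             if mode == 0 and not i%2:
--                 answer += code[i]
--             elif mode == 1 and i%2:
--                 answer += code[i]
--     if not len(answer):
--         answer = "EMPTY"
--
--     return answer
-- ===== SOURCE B (Python) =====
-- def solution(code):
--     # Split on '1': the '1's vanish, and segment k is processed in "mode" k%2.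
--     # Within segment k starting at global position pos, we keep every other
--     # character, starting at offset (k+pos)%2.
--     pieces = []
--     pos = 0
--     for k, seg in enumerate(code.split('1')):
--         pieces.append(alternate(seg if (k + pos) % 2 == 0 else seg[1:]))
--         pos += len(seg) + 1
--     return ''.join(pieces) or "EMPTY"
--
--
-- def alternate(seg):
--     # every other character of seg (seg[0], seg[2], ...): take one, skip one
--     it = iter(seg)
--     out = []
--     for ch in it:
--         out.append(ch)
--         next(it, None)
--     return ''.join(out)
-- ===== Notes on version B (the rewrite author's own statement) =====
-- stated objective: faster
-- what changed: Instead of one per-character loop with a running mode toggle, B splits the code on '1' (so the '1's vanish and each segment's mode is its index parity) and extracts every other character of each segment with a take-one-skip-one pass, then joins the pieces.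
import Mathlib
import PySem

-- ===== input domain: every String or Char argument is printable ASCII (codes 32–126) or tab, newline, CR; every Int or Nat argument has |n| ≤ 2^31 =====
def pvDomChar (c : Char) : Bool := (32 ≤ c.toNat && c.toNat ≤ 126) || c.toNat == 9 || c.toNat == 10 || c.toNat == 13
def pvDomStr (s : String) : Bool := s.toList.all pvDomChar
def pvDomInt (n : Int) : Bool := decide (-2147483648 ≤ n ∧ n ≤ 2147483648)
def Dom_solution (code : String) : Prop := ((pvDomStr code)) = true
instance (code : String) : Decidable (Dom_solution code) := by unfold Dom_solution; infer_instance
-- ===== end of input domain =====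

-- B removes the '1's by splitting the code on '1' (segment k is in mode k%2) and takes
-- every other character of each segment by a stride-2 recursion — no running mode toggle
-- (alternative decomposition, same result).


-- ===== PORT A =====
-- one step of A's loop body: state = (answer, mode), input = (i, code[i])
def pvStepA : List Char × Nat → Int × Char → List Char × Nat
  | (ans, mode), (i, c) =>
    if c = '1' then (ans, (mode + 1) % 2)
    else if mode = 0 ∧ i % 2 = 0 then (ans ++ [c], mode)
    else if mode = 1 ∧ ¬(i % 2 = 0) then (ans ++ [c], mode)
    else (ans, mode)

def solution (code : String) : String :=
  let r := (PySem.List.enumerate code.toList).foldl pvStepA ([], 0)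
  if r.1.length = 0 then "EMPTY" else String.ofList r.1

-- ===== PORT B =====
-- alternate(seg): every other character of seg — Source B's take-one-skip-one iterator loop
def pvAlt : List Char → List Char
  | [] => []
  | [c] => [c]
  | c :: _ :: rest => c :: pvAlt rest

-- one step of B's loop: state = (pieces, pos), input = (k, seg)
def pvStepB : List (List Char) × Int → Int × List Char → List (List Char) × Int
  | (pieces, pos), (k, seg) =>
    (pieces ++ [pvAlt (if (k + pos) % 2 = 0 then seg else PySem.List.slice seg (some 1) none)],
     pos + seg.length + 1)

def solution_alt (code : String) : String :=
  let segs := PySem.Chars.splitOn code.toList ['1']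
  let pieces := ((PySem.List.enumerate segs).foldl pvStepB ([], 0)).1
  let ans := PySem.Chars.join [] pieces
  if ans = [] then "EMPTY" else String.ofList ans

-- ===== PRECONDITION & SPEC =====
def Spec_solution (code : String) (out : String) : Prop := out = solution_alt code
instance (code : String) (out : String) : Decidable (Spec_solution code out) := by unfold Spec_solution; infer_instance

-- ===== CLAIM (what is proved, stated in full; the proofs are below) =====
def Claim_equal_solution : Prop := ∀ (code : String), Dom_solution code → Spec_solution code (solution code)

-- ===== LEMMAS AND PROOFS =====

-- common characterisation: the kept characters of cs when the running parity (ones + index) is p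
def pvK : List Char → Int → List Char
  | [], _ => []
  | c :: cs, p => if c = '1' then pvK cs p else (if p % 2 = 0 then [c] else []) ++ pvK cs (p + 1)

lemma pvK_congr (cs : List Char) : ∀ p q : Int, p % 2 = q % 2 → pvK cs p = pvK cs q := by
  induction cs with
  | nil => intro p q _; rfl
  | cons c cs ih =>
    intro p q h
    simp only [pvK]
    by_cases hc : c = '1'
    · rw [if_pos hc, if_pos hc, ih p q h]
    · rw [if_neg hc, if_neg hc, h, ih (p + 1) (q + 1) (by omega)]

-- ===== A-side: the fold is pvK =====
lemma foldA_eq (cs : List Char) : ∀ (i : Int) (m : Nat) (ans : List Char), m < 2 →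
    ((PySem.List.enumerate cs i).foldl pvStepA (ans, m)).1 = ans ++ pvK cs (m + i) := by
  induction cs with
  | nil => intro i m ans _; simp [PySem.List.enumerate, pvK]
  | cons c cs ih =>
    intro i m ans hm
    rw [PySem.List.enumerate_cons, List.foldl_cons]
    simp only [pvStepA, pvK]
    by_cases hc : c = '1'
    · rw [if_pos hc, if_pos hc, ih (i + 1) ((m + 1) % 2) ans (by omega),
        pvK_congr cs (((m + 1) % 2 : Nat) + (i + 1)) (m + i) (by push_cast; omega)]
    · rw [if_neg hc, if_neg hc]
      by_cases hp : ((m : Int) + i) % 2 = 0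
      · have hkeep : (m = 0 ∧ i % 2 = 0) ∨ (m = 1 ∧ ¬(i % 2 = 0)) := by
          have := Int.emod_two_eq i; omega
        rw [if_pos hp]
        rcases hkeep with ⟨h1, h2⟩ | ⟨h1, h2⟩
        · rw [if_pos ⟨h1, h2⟩, ih (i + 1) m (ans ++ [c]) hm]
          simp only [List.append_assoc, List.singleton_append]
          rw [show (m : Int) + (i + 1) = (m + i) + 1 by ring]
        · rw [if_neg (by omega), if_pos ⟨h1, h2⟩, ih (i + 1) m (ans ++ [c]) hm]
          simp only [List.append_assoc, List.singleton_append]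
          rw [show (m : Int) + (i + 1) = (m + i) + 1 by ring]
      · have h1 : ¬(m = 0 ∧ i % 2 = 0) := by have := Int.emod_two_eq i; omega
        have h2 : ¬(m = 1 ∧ ¬(i % 2 = 0)) := by have := Int.emod_two_eq i; omega
        rw [if_neg hp, if_neg h1, if_neg h2, ih (i + 1) m ans hm,
          show (m : Int) + (i + 1) = (m + i) + 1 by ring]
        simp

-- ===== B-side: splitOn is the structural split pvSplit =====
def pvConsHead (x : List Char) : List (List Char) → List (List Char)
  | [] => [x]
  | s :: ss => (x ++ s) :: ss

def pvSplit : List Char → List (List Char)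
  | [] => [[]]
  | c :: cs => if c = '1' then [] :: pvSplit cs else pvConsHead [c] (pvSplit cs)

lemma pvConsHead_nil : ∀ ss : List (List Char), ss ≠ [] → pvConsHead [] ss = ss
  | [], h => absurd rfl h
  | s :: ss, _ => by simp [pvConsHead]

lemma pvSplit_ne_nil (cs : List Char) : pvSplit cs ≠ [] := by
  cases cs with
  | nil => simp [pvSplit]
  | cons c cs =>
    simp only [pvSplit]
    split
    · simp
    · cases h : pvSplit cs <;> simp [pvConsHead]

lemma pvConsHead_assoc (x y : List Char) (ss : List (List Char)) :
    pvConsHead x (pvConsHead y ss) = pvConsHead (x ++ y) ss := by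
  cases ss <;> simp [pvConsHead]

lemma go_eq : ∀ (fuel : Nat) (l cur : List Char) (acc : List (List Char)), l.length < fuel →
    PySem.Chars.splitOn.go ['1'] fuel l cur acc = acc.reverse ++ pvConsHead cur.reverse (pvSplit l) := by
  intro fuel
  induction fuel with
  | zero => intro l cur acc h; omega
  | succ fuel ih =>
    intro l cur acc h
    cases l with
    | nil => simp [PySem.Chars.splitOn.go, pvSplit, pvConsHead]
    | cons c rest =>
      rw [PySem.Chars.splitOn.go]
      by_cases hc : c = '1'
      · have hpre : List.isPrefixOf ['1'] (c :: rest) = true := by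
          simp [List.isPrefixOf, hc]
        rw [if_pos hpre]
        simp only [List.length_cons, List.length_nil, List.drop_succ_cons, List.drop_zero]
        rw [ih rest [] (cur.reverse :: acc) (by simp at h; omega)]
        simp only [List.reverse_nil]
        rw [pvConsHead_nil (pvSplit rest) (pvSplit_ne_nil rest)]
        simp [pvSplit, hc, pvConsHead]
      · have hpre : List.isPrefixOf ['1'] (c :: rest) = false := by
          simp [List.isPrefixOf]; exact fun h' => hc h'.symm
        rw [if_neg (by simp [hpre])]
        rw [ih rest (c :: cur) acc (by simp at h; omega)]
        simp only [List.reverse_cons, pvSplit, if_neg hc, pvConsHead_assoc]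

lemma splitOn_eq (cs : List Char) : PySem.Chars.splitOn cs ['1'] = pvSplit cs := by
  unfold PySem.Chars.splitOn
  rw [go_eq (cs.length + 1) cs [] [] (by omega)]
  simp [pvConsHead_nil (pvSplit cs) (pvSplit_ne_nil cs)]

-- ===== B-side: pvAlt on a '1'-free list is pvK =====
lemma pvAlt_cons (c : Char) (cs : List Char) : pvAlt (c :: cs) = c :: pvAlt cs.tail := by
  cases cs <;> simp [pvAlt]

lemma pvK_free (cs : List Char) : ∀ p : Int, '1' ∉ cs →
    pvK cs p = if p % 2 = 0 then pvAlt cs else pvAlt cs.tail := by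
  induction cs with
  | nil => intro p _; simp [pvK, pvAlt]
  | cons c cs ih =>
    intro p hmem
    have hc : c ≠ '1' := fun h => hmem (h ▸ List.mem_cons_self)
    have hcs : '1' ∉ cs := fun h => hmem (List.mem_cons_of_mem c h)
    simp only [pvK, if_neg hc, ih (p + 1) hcs]
    by_cases hp : p % 2 = 0
    · rw [if_pos hp, if_pos hp, if_neg (show ¬((p + 1) % 2 = 0) by omega), pvAlt_cons]
      simp
    · rw [if_neg hp, if_neg hp, if_pos (show (p + 1) % 2 = 0 by omega)]
      simp

lemma pvK_append (a : List Char) : ∀ (bs : List Char) (p : Int), '1' ∉ a →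
    pvK (a ++ bs) p = pvK a p ++ pvK bs (p + a.length) := by
  induction a with
  | nil => intro bs p _; simp [pvK]
  | cons c a ih =>
    intro bs p hmem
    have hc : c ≠ '1' := fun h => hmem (h ▸ List.mem_cons_self)
    have ha : '1' ∉ a := fun h => hmem (List.mem_cons_of_mem c h)
    simp only [List.cons_append, pvK, if_neg hc, ih bs (p + 1) ha, List.append_assoc,
      List.length_cons]
    rw [pvK_congr bs (p + 1 + a.length) (p + (a.length + 1)) (by omega)]
    norm_cast

lemma pvK_one (r : List Char) (p : Int) : pvK ('1' :: r) p = pvK r p := by simp [pvK]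

lemma pvDropWhile_head {α : Type} (p : α → Bool) :
    ∀ (l : List α) (x : α) (r : List α), List.dropWhile p l = x :: r → p x = false := by
  intro l
  induction l with
  | nil => intro x r h; simp [List.dropWhile] at h
  | cons c cs ih =>
    intro x r h
    rw [List.dropWhile_cons] at h
    by_cases hc : p c = true
    · rw [if_pos hc] at h; exact ih x r h
    · rw [if_neg hc] at h
      cases h
      simpa using hc

lemma pvSplit_free (cs : List Char) : '1' ∉ cs → pvSplit cs = [cs] := by
  induction cs with
  | nil => intro _; rfl
  | cons c cs ih =>
    intro hmem
    have hc : c ≠ '1' := fun h => hmem (h ▸ List.mem_cons_self)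
    have hcs : '1' ∉ cs := fun h => hmem (List.mem_cons_of_mem c h)
    simp [pvSplit, if_neg hc, ih hcs, pvConsHead]

lemma pvSplit_append_free (a : List Char) : ∀ r : List Char, '1' ∉ a →
    pvSplit (a ++ '1' :: r) = a :: pvSplit r := by
  induction a with
  | nil => intro r _; simp [pvSplit]
  | cons c a ih =>
    intro r hmem
    have hc : c ≠ '1' := fun h => hmem (h ▸ List.mem_cons_self)
    have ha : '1' ∉ a := fun h => hmem (List.mem_cons_of_mem c h)
    simp [pvSplit, if_neg hc, ih r ha, pvConsHead]

-- the main B-side fold lemma, by strong induction on the length (one segment per step)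
lemma foldB_eq : ∀ (n : Nat) (cs : List Char), cs.length ≤ n → ∀ (k pos : Int) (pieces : List (List Char)),
    (((PySem.List.enumerate (pvSplit cs) k).foldl pvStepB (pieces, pos)).1).flatten
      = pieces.flatten ++ pvK cs (k + pos) := by
  intro n
  induction n with
  | zero =>
    intro cs hlen k pos pieces
    have : cs = [] := List.eq_nil_of_length_eq_zero (by omega)
    subst this
    simp [pvSplit, PySem.List.enumerate_cons, PySem.List.enumerate, pvStepB, pvK,
      PySem.List.slice_from_one, pvAlt]
  | succ n ih =>
    intro cs hlen k pos pieces
    have hdecomp : cs = cs.takeWhile (· ≠ '1') ++ cs.dropWhile (· ≠ '1') :=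
      (List.takeWhile_append_dropWhile).symm
    set a := cs.takeWhile (· ≠ '1') with ha_def
    have hafree : '1' ∉ a := by
      intro hmem
      have := List.mem_takeWhile_imp hmem
      simp at this
    cases hd : cs.dropWhile (· ≠ '1') with
    | nil =>
      have hcs : cs = a := by rw [hdecomp, hd, List.append_nil]
      rw [hcs, pvSplit_free a hafree, PySem.List.enumerate_cons, PySem.List.enumerate,
        List.foldl_cons, List.foldl_nil]
      simp only [pvStepB, List.flatten_append, List.flatten_cons, List.flatten_nil,
        List.append_nil, PySem.List.slice_from_one]
      rw [pvK_free a (k + pos) hafree]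
      split <;> rfl
    | cons x r =>
      have hx : x = '1' := by
        have := pvDropWhile_head (fun c => decide (c ≠ '1')) cs x r hd
        simpa using this
      subst hx
      have hcs : cs = a ++ '1' :: r := by rw [hdecomp, hd]
      have hr : r.length ≤ n := by
        have : cs.length = a.length + 1 + r.length := by rw [hcs]; simp; omega
        omega
      rw [hcs, pvSplit_append_free a r hafree, PySem.List.enumerate_cons, List.foldl_cons]
      simp only [pvStepB, PySem.List.slice_from_one]
      rw [ih r hr (k + 1) (pos + a.length + 1) (pieces ++ [pvAlt (if (k + pos) % 2 = 0 then a else a.tail)])]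
      rw [pvK_append a ('1' :: r) (k + pos) hafree, pvK_one]
      simp only [List.flatten_append, List.flatten_cons, List.flatten_nil,
        List.append_nil, List.append_assoc]
      rw [pvK_free a (k + pos) hafree,
        pvK_congr r (k + 1 + (pos + a.length + 1)) (k + pos + a.length) (by omega),
        apply_ite pvAlt]

lemma join_nil_flatten : ∀ parts : List (List Char), PySem.Chars.join [] parts = parts.flatten := by
  intro parts
  induction parts with
  | nil => simp [PySem.Chars.join_nil]
  | cons p rest ih =>
    cases rest with
    | nil => simp [PySem.Chars.join_singleton]
    | cons q rest' => rw [PySem.Chars.join_cons_cons, List.flatten_cons, ih]; simp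

-- ===== VERDICT (by name: the statement is the Claim_ definition above) =====
theorem solution_spec : Claim_equal_solution := by
  intro code _
  unfold Spec_solution solution solution_alt
  have hA := foldA_eq code.toList 0 0 [] (by omega)
  simp only [Nat.cast_zero, zero_add, List.nil_append] at hA
  have hB := foldB_eq code.toList.length code.toList le_rfl 0 0 []
  simp only [zero_add, List.flatten_nil, List.nil_append] at hB
  simp only [splitOn_eq, join_nil_flatten, hA, hB]
  by_cases h : pvK code.toList 0 = []
  · simp [h]
  · rw [if_neg (by simpa using h), if_neg h]
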